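-- pv_equiv track=rewrite | github.com/stefanwebb/coding-challenge-preparation | coderbyte/easy/palindrome-creator.py | PalindromeCreator
-- ===== SOURCE A (Python) =====
-- def isPalindrome(s):
--     left = (len(s)+1)//2
--     right = len(s)//2
--     return s[0:left] == s[right:][::-1]
--
-- def PalindromeCreator(s):
--     if len(s) >= 3 and isPalindrome(s):
--         return 'palindrome'
--
--     if len(s) < 3:
--         return 'not possible'
--
--     # Remove 1 character
--     for idx in range(len(s)):
--         removed = s[idx]
--         substring = s[0:idx] + s[(idx+1):]
--         if isPalindrome(substring):
--             return removed
--
--     # Remove 2 characters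
--     for idx in range(len(s)-1):
--         for jdx in range(idx+1, len(s)):
--             r1, r2 = s[idx], s[jdx]
--             substring = s[0:idx] + s[(idx+1):jdx] + s[(jdx+1):]
--             if isPalindrome(substring):
--                 return r1+r2
--
--     # code goes here
--     return 'not possible'
-- ===== SOURCE B (Python) =====
-- # Two-pointer hole-skipping check: no substring building, no reversal copies.
-- def _pal_skip(s, l, r, h1, h2):
--     while l < r:
--         if l == h1 or l == h2:
--             l += 1
--         elif r == h1 or r == h2:
--             r -= 1
--         elif s[l] != s[r]:
--             return False
--         else:
--             l += 1
--             r -= 1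
--     return True
--
-- def PalindromeCreator(s):
--     n = len(s)
--     if n < 3:
--         return 'not possible'
--     if _pal_skip(s, 0, n - 1, -1, -1):
--         return 'palindrome'
--     for i in range(n):
--         if _pal_skip(s, 0, n - 1, i, -1):
--             return s[i]
--     for i in range(n - 1):
--         for j in range(i + 1, n):
--             if _pal_skip(s, 0, n - 1, i, j):
--                 return s[i] + s[j]
--     return 'not possible'
-- ===== Notes on version B (the rewrite author's own statement) =====
-- stated objective: faster
-- what changed: B replaces A's per-candidate substring construction (slice-concatenate, then compare first half with the reversed second half) by an in-place two-pointer walk over the original string that skips the removed indices and exits on the first mismatch, keeping A's exact candidate enumeration order.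
import Mathlib
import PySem

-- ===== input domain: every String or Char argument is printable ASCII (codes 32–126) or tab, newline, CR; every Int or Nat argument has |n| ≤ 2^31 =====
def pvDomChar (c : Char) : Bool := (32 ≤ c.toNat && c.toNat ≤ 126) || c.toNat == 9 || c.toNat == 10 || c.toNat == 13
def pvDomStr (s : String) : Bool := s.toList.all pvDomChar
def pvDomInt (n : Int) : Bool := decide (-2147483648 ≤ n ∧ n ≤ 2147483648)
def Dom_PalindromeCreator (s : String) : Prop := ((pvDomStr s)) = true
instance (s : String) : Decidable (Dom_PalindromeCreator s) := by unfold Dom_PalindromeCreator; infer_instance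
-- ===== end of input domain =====

-- B replaces A's build-substring-and-compare-reversed-halves palindrome test by an in-place
-- two-pointer walk that skips the (at most two) removed indices: no substring or reversal copies,
-- same candidate enumeration order, so the same exact return value.

-- ===== PORT A =====
-- helper isPalindrome: s[0:(len+1)//2] == s[len//2:][::-1]
def isPalA (t : List Char) : Bool :=
  let left := PySem.Int.floordiv ((t.length : Int) + 1) 2
  let right := PySem.Int.floordiv (t.length : Int) 2
  PySem.List.slice t (some 0) (some left) ==
    ((PySem.List.slice? (PySem.List.slice t (some right) none) none none (-1)).getD [])
    -- step is -1 ≠ 0, so slice? is never none; .getD [] is exact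

-- 'for idx in range(len(s)): … return removed' as recursion over the index list
def loopA1 (t : List Char) : List Int → Option String
  | [] => none
  | idx :: rest =>
    match PySem.List.pyGet? t idx with
    | none => none   -- unreachable: idx ∈ range(len(t)), Python never raises here
    | some c =>
      if isPalA (PySem.List.slice t (some 0) (some idx) ++
                 PySem.List.slice t (some (idx+1)) none)
      then some (String.ofList [c]) else loopA1 t rest

def loopA2inner (t : List Char) (idx : Int) : List Int → Option String
  | [] => none
  | jdx :: rest =>
    match PySem.List.pyGet? t idx, PySem.List.pyGet? t jdx with
    | some c1, some c2 =>
      if isPalA (PySem.List.slice t (some 0) (some idx) ++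
                 PySem.List.slice t (some (idx+1)) (some jdx) ++
                 PySem.List.slice t (some (jdx+1)) none)
      then some (String.ofList [c1, c2]) else loopA2inner t idx rest
    | _, _ => none   -- unreachable: both indices are in range

def loopA2 (t : List Char) : List Int → Option String
  | [] => none
  | idx :: rest =>
    match loopA2inner t idx (PySem.List.pyRange (idx+1) (t.length : Int) 1) with
    | some r => some r
    | none => loopA2 t rest

def PalindromeCreator (s : String) : String :=
  if 3 ≤ (s.toList.length : Int) && isPalA s.toList then "palindrome"
  else if (s.toList.length : Int) < 3 then "not possible"
  else
    match loopA1 s.toList (PySem.List.pyRange 0 (s.toList.length : Int) 1) with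
    | some r => r
    | none =>
      match loopA2 s.toList (PySem.List.pyRange 0 ((s.toList.length : Int)-1) 1) with
      | some r => r
      | none => "not possible"

-- ===== PORT B =====
-- two-pointer palindrome test over the original list, skipping holes h1 h2 (-1 = no hole)
def palSkip (t : List Char) (l r h1 h2 : Int) : Bool :=
  if l < r then
    if l == h1 || l == h2 then palSkip t (l+1) r h1 h2
    else if r == h1 || r == h2 then palSkip t l (r-1) h1 h2
    else
      match PySem.List.pyGet? t l, PySem.List.pyGet? t r with
      | some a, some b => if a != b then false else palSkip t (l+1) (r-1) h1 h2
      | _, _ => false   -- unreachable in B's calls: 0 ≤ l < r < len(t)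
  else true
termination_by (r - l).toNat
decreasing_by all_goals omega

def loopB1 (t : List Char) : List Int → Option String
  | [] => none
  | i :: rest =>
    if palSkip t 0 ((t.length : Int) - 1) i (-1) then
      match PySem.List.pyGet? t i with
      | some c => some (String.ofList [c])
      | none => none   -- unreachable: i ∈ range(len(t))
    else loopB1 t rest

def loopB2inner (t : List Char) (i : Int) : List Int → Option String
  | [] => none
  | j :: rest =>
    if palSkip t 0 ((t.length : Int) - 1) i j then
      match PySem.List.pyGet? t i, PySem.List.pyGet? t j with
      | some c1, some c2 => some (String.ofList [c1, c2])
      | _, _ => none   -- unreachable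
    else loopB2inner t i rest

def loopB2 (t : List Char) : List Int → Option String
  | [] => none
  | i :: rest =>
    match loopB2inner t i (PySem.List.pyRange (i+1) (t.length : Int) 1) with
    | some r => some r
    | none => loopB2 t rest

def PalindromeCreator_alt (s : String) : String :=
  if (s.toList.length : Int) < 3 then "not possible"
  else if palSkip s.toList 0 ((s.toList.length : Int)-1) (-1) (-1) then "palindrome"
  else
    match loopB1 s.toList (PySem.List.pyRange 0 (s.toList.length : Int) 1) with
    | some r => r
    | none =>
      match loopB2 s.toList (PySem.List.pyRange 0 ((s.toList.length : Int)-1) 1) with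
      | some r => r
      | none => "not possible"

-- ===== PRECONDITION & SPEC =====
def Spec_PalindromeCreator (s : String) (out : String) : Prop := out = PalindromeCreator_alt s
instance (s : String) (out : String) : Decidable (Spec_PalindromeCreator s out) := by unfold Spec_PalindromeCreator; infer_instance

-- ===== CLAIM (what is proved, stated in full; the proofs are below) =====
def Claim_equal_PalindromeCreator : Prop := ∀ (s : String), Dom_PalindromeCreator s → Spec_PalindromeCreator s (PalindromeCreator s)

-- ===== LEMMAS AND PROOFS =====

theorem half_iff (u : List Char) :
    u.take ((u.length+1)/2) = (u.drop (u.length/2)).reverse ↔ u = u.reverse := by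
  constructor
  · intro h
    apply List.ext_getElem (by simp)
    intro i hi _
    have key : ∀ j (hj : j < (u.length+1)/2), u[j] = u[u.length-1-j] := by
      intro j hj
      have h1 : (u.take ((u.length+1)/2))[j]'(by simp; omega) = u[j]'(by omega) := by
        simp [List.getElem_take]
      have h2 : ((u.drop (u.length/2)).reverse)[j]'(by simp; omega)
          = u[u.length-1-j]'(by omega) := by
        rw [List.getElem_reverse]
        rw [List.getElem_drop]
        congr 1
        simp only [List.length_drop]
        omega
      calc u[j]'(by omega) = (u.take ((u.length+1)/2))[j]'(by simp; omega) := h1.symm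
        _ = ((u.drop (u.length/2)).reverse)[j]'(by simp; omega) := List.getElem_of_eq h _
        _ = u[u.length-1-j]'(by omega) := h2
    rw [List.getElem_reverse]
    by_cases hc : i < (u.length+1)/2
    · exact key i hc
    · have hj : u.length - 1 - i < (u.length+1)/2 := by omega
      have := key _ hj
      rw [this]
      congr 1
      omega
  · intro h
    apply List.ext_getElem (by simp; omega)
    intro i hi hi2
    have hiu : i < u.length := by simp at hi; omega
    have e1 : (u.take ((u.length+1)/2))[i]'hi = u[i]'hiu := by simp [List.getElem_take]
    have e2 : ((u.drop (u.length/2)).reverse)[i]'hi2 = u[u.length-1-i]'(by omega) := by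
      rw [List.getElem_reverse, List.getElem_drop]
      simp only [List.length_reverse, List.length_drop] at hi2 ⊢
      congr 1
      omega
    rw [e1, e2]
    calc u[i]'hiu = u.reverse[i]'(by simpa) := List.getElem_of_eq h _
      _ = u[u.length-1-i]'(by omega) := by rw [List.getElem_reverse]

theorem isPalA_iff (u : List Char) : isPalA u = true ↔ u = u.reverse := by
  have hl : PySem.Int.floordiv ((u.length : Int) + 1) 2 = (((u.length+1)/2 : Nat) : Int) := by
    have := PySem.Int.floordiv_natCast (u.length+1) 2
    push_cast at this ⊢
    exact_mod_cast this
  have hr : PySem.Int.floordiv ((u.length : Int)) 2 = (((u.length)/2 : Nat) : Int) := by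
    exact_mod_cast PySem.Int.floordiv_natCast (u.length) 2
  simp only [isPalA, hl, hr, PySem.List.slice_zero_start,
    PySem.List.slice_to_natCast, PySem.List.slice_from_natCast,
    PySem.List.slice?_none_none_neg_one, Option.getD_some, beq_iff_eq]
  exact half_iff u

def segIdx (t : List Char) (l r h1 h2 : Int) : List Char :=
  ((PySem.List.pyRange l (r+1) 1).filter (fun k => !(k == h1 || k == h2))).map
    (fun k => (PySem.List.pyGet? t k).getD 'a')


theorem short_self_rev {xs : List Char} (h : xs.length ≤ 1) : xs = xs.reverse := by
  match xs with
  | [] => rfl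
  | [a] => rfl
  | a :: b :: rest => simp at h

theorem cons_append_rev (a b : Char) (xs : List Char) :
    a :: (xs ++ [b]) = (a :: (xs ++ [b])).reverse ↔ a = b ∧ xs = xs.reverse := by
  rw [List.reverse_cons, List.reverse_append]
  simp only [List.reverse_cons, List.reverse_nil, List.nil_append, List.cons_append,
    List.cons.injEq]
  constructor
  · rintro ⟨rfl, h2⟩
    exact ⟨rfl, by simpa using List.append_inj_left' h2 (by simp)⟩
  · rintro ⟨rfl, h2⟩
    exact ⟨rfl, by rw [← h2]⟩

theorem pyGet?_in_range (t : List Char) (i : Int) (h0 : 0 ≤ i) (h1 : i < (t.length : Int)) :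
    PySem.List.pyGet? t i = some (t[i.toNat]'(by omega)) := by
  obtain ⟨m, rfl⟩ : ∃ m : Nat, i = (m : Int) := ⟨i.toNat, by omega⟩
  rw [PySem.List.pyGet?_natCast]
  simp only [Int.toNat_natCast]
  exact List.getElem?_eq_getElem (by exact_mod_cast h1)

theorem seg_skip_left (t : List Char) (l r h1 h2 : Int) (hlt : l < r + 1)
    (hh : (l == h1 || l == h2) = true) :
    segIdx t l r h1 h2 = segIdx t (l+1) r h1 h2 := by
  unfold segIdx
  rw [PySem.List.pyRange_one_cons hlt, List.filter_cons]
  simp [hh]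

theorem seg_skip_right (t : List Char) (l r h1 h2 : Int) (hle : l ≤ r)
    (hh : (r == h1 || r == h2) = true) :
    segIdx t l r h1 h2 = segIdx t l (r-1) h1 h2 := by
  unfold segIdx
  have e : r - 1 + 1 = r := by ring
  rw [e, PySem.List.pyRange_one_succ_right hle, List.filter_append, List.map_append]
  rcases (by simpa using hh : r = h1 ∨ r = h2) with h | h <;> simp [h]

theorem seg_split (t : List Char) (l r h1 h2 : Int) (hlt : l < r)
    (hl : 0 ≤ l) (hr : r < (t.length : Int))
    (hnl : ¬(l == h1 || l == h2) = true) (hnr : ¬(r == h1 || r == h2) = true) :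
    segIdx t l r h1 h2 =
      t[l.toNat]'(by omega) :: (segIdx t (l+1) (r-1) h1 h2 ++ [t[r.toNat]'(by omega)]) := by
  unfold segIdx
  have e : r - 1 + 1 = r := by ring
  have c1 : (!(l == h1 || l == h2)) = true := by simpa using hnl
  have c2 : (!(r == h1 || r == h2)) = true := by simpa using hnr
  rw [e, PySem.List.pyRange_one_cons (by omega : l < r + 1),
    PySem.List.pyRange_one_succ_right (by omega : l + 1 ≤ r),
    List.filter_cons, if_pos c1, List.filter_append, List.map_cons, List.map_append]
  have hfr : List.filter (fun k => !(k == h1 || k == h2)) [r] = [r] := by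
    rw [List.filter_singleton, c2, cond_true]
  rw [hfr, List.map_cons, List.map_nil,
    pyGet?_in_range t l hl (by omega), pyGet?_in_range t r (by omega) hr]
  rfl

theorem palSkip_iff (t : List Char) (l r h1 h2 : Int) (hl : 0 ≤ l) (hr : r < (t.length : Int)) :
    palSkip t l r h1 h2 = true ↔ segIdx t l r h1 h2 = (segIdx t l r h1 h2).reverse := by
  fun_induction palSkip t l r h1 h2 with
  | case1 l r hlt hh ih =>
    rw [ih (by omega) hr, seg_skip_left t l r h1 h2 (by omega) hh]
  | case2 l r hlt hnl hh ih =>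
    rw [ih hl (by omega), seg_skip_right t l r h1 h2 (by omega) hh]
  | case3 l r hlt hnl hnr a b hga hgb hne =>
    have ea : a = t[l.toNat]'(by omega) := by
      have := pyGet?_in_range t l hl (by omega)
      rw [hgb] at this; exact Option.some.inj this
    have eb : b = t[r.toNat]'(by omega) := by
      have := pyGet?_in_range t r (by omega) hr
      rw [hga] at this; exact Option.some.inj this
    rw [seg_split t l r h1 h2 hlt hl hr hnl hnr, cons_append_rev]
    simp only [Bool.false_eq_true, false_iff, not_and]
    intro hab
    have hne' : a ≠ b := by simpa using hne
    exact absurd (by rw [ea, eb, hab] : a = b) hne'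
  | case4 l r hlt hnl hnr a b hga hgb hne ih =>
    have ea : a = t[l.toNat]'(by omega) := by
      have := pyGet?_in_range t l hl (by omega)
      rw [hgb] at this; exact Option.some.inj this
    have eb : b = t[r.toNat]'(by omega) := by
      have := pyGet?_in_range t r (by omega) hr
      rw [hga] at this; exact Option.some.inj this
    have hab : a = b := by simpa using hne
    rw [ih (by omega) (by omega), seg_split t l r h1 h2 hlt hl hr hnl hnr, cons_append_rev]
    constructor
    · intro h; exact ⟨by rw [← ea, ← eb, hab], h⟩
    · intro h; exact h.2
  | case5 l r hlt hnl hnr hm =>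
    exfalso
    exact hm _ _ (pyGet?_in_range t l hl (by omega)) (pyGet?_in_range t r (by omega) hr)
  | case6 l r hge =>
    simp only [true_iff]
    apply short_self_rev
    calc (segIdx t l r h1 h2).length
        ≤ (PySem.List.pyRange l (r+1) 1).length := by
          unfold segIdx; rw [List.length_map]; exact List.length_filter_le _ _
      _ ≤ 1 := by rw [PySem.List.length_pyRange_one]; omega

theorem mapGet_pyRange (t : List Char) (a b : Nat) (hb : b ≤ t.length) :
    ((PySem.List.pyRange (a:Int) (b:Int) 1).map fun k => (PySem.List.pyGet? t k).getD 'a')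
      = (t.drop a).take (b - a) := by
  rw [PySem.List.pyRange_one, List.map_map]
  have hm : ((b:Int) - (a:Int)).toNat = b - a := by omega
  rw [hm]
  apply List.ext_getElem
  · simp; omega
  · intro i hi hi2
    simp only [List.getElem_map, List.getElem_range, Function.comp_apply,
      List.getElem_take, List.getElem_drop]
    simp only [List.length_map, List.length_range] at hi
    have : (a : Int) + (i : Int) = ((a + i : Nat) : Int) := by push_cast; ring
    rw [this, PySem.List.pyGet?_natCast, List.getElem?_eq_getElem (by omega)]
    rfl

theorem filter_noop (a b h1 h2 : Int)
    (h : ∀ k : Int, a ≤ k → k < b → k ≠ h1 ∧ k ≠ h2) :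
    (PySem.List.pyRange a b 1).filter (fun k => !(k == h1 || k == h2))
      = PySem.List.pyRange a b 1 := by
  apply List.filter_eq_self.mpr
  intro k hk
  rw [PySem.List.mem_pyRange_one] at hk
  obtain ⟨h1', h2'⟩ := h k hk.1 hk.2
  simp [h1', h2']

theorem seg_all (t : List Char) :
    segIdx t 0 ((t.length : Int) - 1) (-1) (-1) = t := by
  unfold segIdx
  have e : (t.length : Int) - 1 + 1 = ((t.length : Nat) : Int) := by ring
  rw [e, filter_noop _ _ _ _ (fun k hk _ => ⟨by omega, by omega⟩)]
  have := mapGet_pyRange t 0 t.length le_rfl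
  simpa using this

theorem seg_one (t : List Char) (i : Nat) (hi : i < t.length) :
    segIdx t 0 ((t.length : Int) - 1) (i : Int) (-1)
      = t.take i ++ t.drop (i+1) := by
  unfold segIdx
  have e : (t.length : Int) - 1 + 1 = ((t.length : Nat) : Int) := by ring
  rw [e, PySem.List.pyRange_one_append 0 (i : Int) _ (by omega) (by omega),
    PySem.List.pyRange_one_append (i : Int) ((i : Int) + 1) _ (by omega) (by omega),
    PySem.List.pyRange_one_singleton]
  rw [List.filter_append, List.filter_append,
    filter_noop _ _ _ _ (fun k hk hk2 => ⟨by omega, by omega⟩),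
    filter_noop _ _ _ _ (fun k hk hk2 => ⟨by omega, by omega⟩)]
  have hfi : List.filter (fun k => !(k == (i:Int) || k == (-1:Int))) [(i:Int)] = [] := by
    simp
  rw [hfi, List.map_append, List.map_append, List.map_nil]
  have h1 := mapGet_pyRange t 0 i (by omega)
  have h2 : ((PySem.List.pyRange ((i:Int)+1) (t.length:Int) 1).map
      fun k => (PySem.List.pyGet? t k).getD 'a') = t.drop (i+1) := by
    have : ((i:Int) + 1) = ((i+1 : Nat) : Int) := by push_cast; ring
    rw [this, mapGet_pyRange t (i+1) t.length le_rfl]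
    exact List.take_of_length_le (by simp)
  simp only [Nat.cast_zero, Nat.sub_zero, List.drop_zero] at h1
  rw [h1, h2, List.nil_append]

theorem seg_two (t : List Char) (i j : Nat) (hij : i < j) (hj : j < t.length) :
    segIdx t 0 ((t.length : Int) - 1) (i : Int) (j : Int)
      = t.take i ++ ((t.drop (i+1)).take (j - (i+1)) ++ t.drop (j+1)) := by
  unfold segIdx
  have e : (t.length : Int) - 1 + 1 = ((t.length : Nat) : Int) := by ring
  rw [e, PySem.List.pyRange_one_append 0 (i : Int) _ (by omega) (by omega),
    PySem.List.pyRange_one_append (i : Int) ((i : Int) + 1) _ (by omega) (by omega),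
    PySem.List.pyRange_one_append ((i:Int)+1) (j : Int) _ (by omega) (by omega),
    PySem.List.pyRange_one_append (j : Int) ((j : Int) + 1) _ (by omega) (by omega),
    PySem.List.pyRange_one_singleton, PySem.List.pyRange_one_singleton]
  simp only [List.filter_append, List.map_append]
  rw [filter_noop _ _ _ _ (fun k hk hk2 => ⟨by omega, by omega⟩),
    filter_noop _ _ _ _ (fun k hk hk2 => ⟨by omega, by omega⟩),
    filter_noop _ _ _ _ (fun k hk hk2 => ⟨by omega, by omega⟩)]
  have hfi : List.filter (fun k => !(k == (i:Int) || k == (j:Int))) [(i:Int)] = [] := by simp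
  have hfj : List.filter (fun k => !(k == (i:Int) || k == (j:Int))) [(j:Int)] = [] := by simp
  rw [hfi, hfj, List.map_nil]
  have h1 := mapGet_pyRange t 0 i (by omega)
  have h2 : ((PySem.List.pyRange ((i:Int)+1) (j:Int) 1).map
      fun k => (PySem.List.pyGet? t k).getD 'a') = (t.drop (i+1)).take (j - (i+1)) := by
    have : ((i:Int) + 1) = ((i+1 : Nat) : Int) := by push_cast; ring
    rw [this, mapGet_pyRange t (i+1) j (by omega)]
  have h3 : ((PySem.List.pyRange ((j:Int)+1) (t.length:Int) 1).map
      fun k => (PySem.List.pyGet? t k).getD 'a') = t.drop (j+1) := by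
    have : ((j:Int) + 1) = ((j+1 : Nat) : Int) := by push_cast; ring
    rw [this, mapGet_pyRange t (j+1) t.length le_rfl]
    exact List.take_of_length_le (by simp)
  simp only [Nat.cast_zero, Nat.sub_zero, List.drop_zero] at h1
  rw [h1, h2, h3]
  simp

-- condition equalities: A's rebuilt-substring test equals B's hole-skipping walk
theorem cond_all (t : List Char) :
    isPalA t = palSkip t 0 ((t.length : Int) - 1) (-1) (-1) := by
  rw [Bool.eq_iff_iff, isPalA_iff,
    palSkip_iff t 0 _ _ _ (by omega) (by omega), seg_all]

theorem cond_one (t : List Char) (i : Nat) (hi : i < t.length) :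
    isPalA (t.take i ++ t.drop (i+1))
      = palSkip t 0 ((t.length : Int) - 1) (i : Int) (-1) := by
  rw [Bool.eq_iff_iff, isPalA_iff,
    palSkip_iff t 0 _ _ _ (by omega) (by omega), seg_one t i hi]

theorem cond_two (t : List Char) (i j : Nat) (hij : i < j) (hj : j < t.length) :
    isPalA (t.take i ++ ((t.drop (i+1)).take (j - (i+1)) ++ t.drop (j+1)))
      = palSkip t 0 ((t.length : Int) - 1) (i : Int) (j : Int) := by
  rw [Bool.eq_iff_iff, isPalA_iff,
    palSkip_iff t 0 _ _ _ (by omega) (by omega), seg_two t i j hij hj]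

-- A's sliced substrings in take/drop form
theorem subst_one (t : List Char) (i : Nat) :
    PySem.List.slice t (some 0) (some (i : Int)) ++ PySem.List.slice t (some ((i:Int)+1)) none
      = t.take i ++ t.drop (i+1) := by
  have e : (i:Int) + 1 = ((i+1 : Nat) : Int) := by push_cast; ring
  rw [PySem.List.slice_zero_start, PySem.List.slice_to_natCast, e,
    PySem.List.slice_from_natCast]

theorem subst_two (t : List Char) (i j : Nat) :
    PySem.List.slice t (some 0) (some (i : Int)) ++
      PySem.List.slice t (some ((i:Int)+1)) (some (j : Int)) ++
      PySem.List.slice t (some ((j:Int)+1)) none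
      = t.take i ++ ((t.drop (i+1)).take (j - (i+1)) ++ t.drop (j+1)) := by
  have e1 : (i:Int) + 1 = ((i+1 : Nat) : Int) := by push_cast; ring
  have e2 : (j:Int) + 1 = ((j+1 : Nat) : Int) := by push_cast; ring
  rw [PySem.List.slice_zero_start, PySem.List.slice_to_natCast, e1, e2,
    PySem.List.slice_natCast, PySem.List.slice_from_natCast, List.append_assoc]

-- the single-removal loops agree
theorem loop1_eq (t : List Char) (L : List Int)
    (hL : ∀ k ∈ L, 0 ≤ k ∧ k < (t.length : Int)) :
    loopA1 t L = loopB1 t L := by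
  induction L with
  | nil => rfl
  | cons idx rest ih =>
    obtain ⟨h0, h1⟩ := hL idx List.mem_cons_self
    obtain ⟨m, rfl⟩ : ∃ m : Nat, idx = (m : Int) := ⟨idx.toNat, by omega⟩
    have hm : m < t.length := by omega
    rw [loopA1, loopB1, pyGet?_in_range t (m : Int) h0 h1, subst_one t m,
      cond_one t m hm]
    by_cases hc : palSkip t 0 ((t.length : Int) - 1) (m : Int) (-1) = true
    · simp [hc]
    · simp only [Bool.not_eq_true] at hc
      simp only [hc, Bool.false_eq_true, if_false]
      exact ih (fun k hk => hL k (List.mem_cons_of_mem _ hk))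

-- the pair-removal inner loops agree
theorem loop2inner_eq (t : List Char) (i : Nat) (hi : i < t.length) (L : List Int)
    (hL : ∀ k ∈ L, (i : Int) < k ∧ k < (t.length : Int)) :
    loopA2inner t (i : Int) L = loopB2inner t (i : Int) L := by
  induction L with
  | nil => rfl
  | cons jdx rest ih =>
    obtain ⟨h0, h1⟩ := hL jdx List.mem_cons_self
    obtain ⟨m, rfl⟩ : ∃ m : Nat, jdx = (m : Int) := ⟨jdx.toNat, by omega⟩
    have him : i < m := by omega
    have hm : m < t.length := by omega
    rw [loopA2inner, loopB2inner, pyGet?_in_range t (i : Int) (by omega) (by omega),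
      pyGet?_in_range t (m : Int) (by omega) h1, subst_two t i m,
      cond_two t i m him hm]
    by_cases hc : palSkip t 0 ((t.length : Int) - 1) (i : Int) (m : Int) = true
    · simp [hc]
    · simp only [Bool.not_eq_true] at hc
      simp only [hc, Bool.false_eq_true, if_false]
      exact ih (fun k hk => hL k (List.mem_cons_of_mem _ hk))

-- the pair-removal outer loops agree
theorem loop2_eq (t : List Char) (L : List Int)
    (hL : ∀ k ∈ L, 0 ≤ k ∧ k < (t.length : Int)) :
    loopA2 t L = loopB2 t L := by
  induction L with
  | nil => rfl
  | cons idx rest ih =>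
    obtain ⟨h0, h1⟩ := hL idx List.mem_cons_self
    obtain ⟨m, rfl⟩ : ∃ m : Nat, idx = (m : Int) := ⟨idx.toNat, by omega⟩
    rw [loopA2, loopB2,
      loop2inner_eq t m (by omega) _ (fun k hk => by
        rw [PySem.List.mem_pyRange_one] at hk; exact ⟨by omega, hk.2⟩),
      ih (fun k hk => hL k (List.mem_cons_of_mem _ hk))]

-- ===== VERDICT (by name: the statement is the Claim_ definition above) =====
theorem PalindromeCreator_spec : Claim_equal_PalindromeCreator := by
  intro s _
  unfold Spec_PalindromeCreator PalindromeCreator PalindromeCreator_alt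
  set t := s.toList with ht
  by_cases hn : (3 : Int) ≤ (t.length : Int)
  · rw [cond_all t]
    by_cases hp : palSkip t 0 ((t.length : Int) - 1) (-1) (-1) = true
    · rw [if_pos (by simp [hp, hn]), if_neg (by omega : ¬ ((t.length : Int) < 3)),
        if_pos hp]
    · simp only [Bool.not_eq_true] at hp
      rw [if_neg (by simp [hp]), if_neg (by omega : ¬ ((t.length : Int) < 3)),
        if_neg (by omega : ¬ ((t.length : Int) < 3)), if_neg (by simp [hp])]
      rw [loop1_eq t _ (fun k hk => by
            rw [PySem.List.mem_pyRange_one] at hk; exact ⟨hk.1, hk.2⟩),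
          loop2_eq t _ (fun k hk => by
            rw [PySem.List.mem_pyRange_one] at hk; exact ⟨hk.1, by omega⟩)]
  · rw [if_neg (by simp; omega), if_pos (by omega : (t.length : Int) < 3),
      if_pos (by omega : (t.length : Int) < 3)]
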